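-- pv_equiv track=rewrite | github.com/jimmy01081122/TinyGPU | verification/System_Level/golden_model/system_golden_model.py | decode_stream
-- ===== SOURCE A (Python) =====
-- OPC_DRAW_POINT = 2
--
-- OPC_DRAW_LINE = 3
--
-- def decode_stream(words):
--     cmds = []
--     i = 0
--     while i < len(words):
--         w0 = words[i]
--         i += 1
--         opc = (w0 >> 28) & 0xF
--         color = (w0 >> 16) & 0xFFF
--         x0 = y0 = x1 = y1 = 0
--         if opc in (OPC_DRAW_POINT, OPC_DRAW_LINE):
--             if i >= len(words):
--                 break
--             w1 = words[i]
--             i += 1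
--             x0 = w1 & 0x3FF
--             y0 = (w1 >> 10) & 0x1FF
--         if opc == OPC_DRAW_LINE:
--             if i >= len(words):
--                 break
--             w2 = words[i]
--             i += 1
--             x1 = w2 & 0x3FF
--             y1 = (w2 >> 10) & 0x1FF
--         if opc == OPC_DRAW_POINT:
--             x1, y1 = x0, y0
--         cmds.append((opc, color, x0, y0, x1, y1))
--     return cmds
-- ===== SOURCE B (Python) =====
-- OPC_DRAW_POINT = 2
--
-- OPC_DRAW_LINE = 3
--
-- # Table-driven decoder: an operand-count table replaces A's chain of opcode ifs;
-- # one length check covers the truncation break, the operand words are sliced off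
-- # in one step, and the command is assembled by matching on the operand list.
-- def decode_stream(words):
--     EXTRA = {OPC_DRAW_POINT: 1, OPC_DRAW_LINE: 2}
--     cmds = []
--     total = len(words)
--     i = 0
--     while i < total:
--         w0 = words[i]
--         opc = (w0 >> 28) & 0xF
--         color = (w0 >> 16) & 0xFFF
--         n = EXTRA.get(opc, 0)
--         if total - (i + 1) < n:
--             break
--         ops = [(w & 0x3FF, (w >> 10) & 0x1FF) for w in words[i + 1:i + 1 + n]]
--         i += 1 + n
--         if not ops:
--             cmds.append((opc, color, 0, 0, 0, 0))
--         elif len(ops) == 1: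
--             (x0, y0), = ops
--             cmds.append((opc, color, x0, y0, x0, y0))
--         else:
--             (x0, y0), (x1, y1) = ops
--             cmds.append((opc, color, x0, y0, x1, y1))
--     return cmds
-- ===== Notes on version B (the rewrite author's own statement) =====
-- stated objective: alternative
-- what changed: Replaces A's per-opcode if-chain and index walk with a table-driven decoder: an operand-count table (EXTRA) is looked up once per command, the needed operand words are sliced off in one step (with a single length check for the truncation break), and the stream is consumed as a shrinking suffix instead of an advancing index.
import Mathlib
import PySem

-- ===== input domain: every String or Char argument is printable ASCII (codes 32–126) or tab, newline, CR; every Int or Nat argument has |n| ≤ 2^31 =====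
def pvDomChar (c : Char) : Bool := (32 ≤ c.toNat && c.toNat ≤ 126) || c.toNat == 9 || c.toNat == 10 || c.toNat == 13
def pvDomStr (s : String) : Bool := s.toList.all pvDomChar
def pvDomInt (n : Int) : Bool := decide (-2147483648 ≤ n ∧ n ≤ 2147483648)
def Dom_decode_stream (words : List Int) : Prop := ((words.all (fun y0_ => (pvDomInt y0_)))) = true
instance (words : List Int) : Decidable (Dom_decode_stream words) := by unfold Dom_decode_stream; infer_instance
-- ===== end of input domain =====

-- B replaces A's per-opcode if-chain by an operand-count table and consumes the
-- stream as a shrinking suffix (objective: alternative decomposition, same cost).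

-- ===== PORT A =====
-- A's while loop over an index i, transliterated as recursion on words.length - i.
def decodeStreamLoop (words : List Int) (i : Nat)
    (cmds : List (Int × Int × Int × Int × Int × Int)) :
    List (Int × Int × Int × Int × Int × Int) :=
  if h : i < words.length then
    let w0 := words[i]
    let opc := PySem.Int.band (w0 >>> 28) 15
    let color := PySem.Int.band (w0 >>> 16) 4095
    -- x0 = y0 = x1 = y1 = 0 initially
    if opc = 2 ∨ opc = 3 then    -- opc in (OPC_DRAW_POINT, OPC_DRAW_LINE)
      if h1 : i + 1 < words.length then
        let w1 := words[i + 1]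
        let x0 := PySem.Int.band w1 1023
        let y0 := PySem.Int.band (w1 >>> 10) 511
        if opc = 3 then          -- OPC_DRAW_LINE
          if h2 : i + 2 < words.length then
            let w2 := words[i + 2]
            let x1 := PySem.Int.band w2 1023
            let y1 := PySem.Int.band (w2 >>> 10) 511
            decodeStreamLoop words (i + 3) (cmds ++ [(opc, color, x0, y0, x1, y1)])
          else cmds              -- break
        else                     -- opc = OPC_DRAW_POINT: x1, y1 = x0, y0
          decodeStreamLoop words (i + 2) (cmds ++ [(opc, color, x0, y0, x0, y0)])
      else cmds                  -- break
    else
      decodeStreamLoop words (i + 1) (cmds ++ [(opc, color, 0, 0, 0, 0)])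
  else cmds
termination_by words.length - i

def decode_stream (words : List Int) : List (Int × Int × Int × Int × Int × Int) :=
  decodeStreamLoop words 0 []

-- ===== PORT B =====
-- EXTRA = {OPC_DRAW_POINT: 1, OPC_DRAW_LINE: 2}
def decodeExtra : PySem.Dict Int Int := PySem.Dict.ofList [(2, 1), (3, 2)]

-- B's while loop: one table lookup, one truncation check, operand slice, match.
def decodeAltGo (words : List Int) (i : Nat)
    (cmds : List (Int × Int × Int × Int × Int × Int)) :
    List (Int × Int × Int × Int × Int × Int) :=
  if h : i < words.length then
    let w0 := words[i]
    let opc := PySem.Int.band (w0 >>> 28) 15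
    let color := PySem.Int.band (w0 >>> 16) 4095
    let n := PySem.Dict.getD decodeExtra opc 0
    if (words.length : Int) - ((i : Int) + 1) < n then cmds   -- break: truncated command dropped
    else
      let ops := (PySem.List.slice words (some ((i : Int) + 1)) (some ((i : Int) + 1 + n))).map
        (fun w => (PySem.Int.band w 1023, PySem.Int.band (w >>> 10) 511))
      -- i += 1 + n ; the table values are 0, 1, 2, so the Nat advance i + 1 + n.toNat is exact
      match ops with
      | [] => decodeAltGo words (i + 1 + n.toNat) (cmds ++ [(opc, color, 0, 0, 0, 0)])
      | [(x0, y0)] => decodeAltGo words (i + 1 + n.toNat) (cmds ++ [(opc, color, x0, y0, x0, y0)])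
      | (x0, y0) :: (x1, y1) :: _ =>
          decodeAltGo words (i + 1 + n.toNat) (cmds ++ [(opc, color, x0, y0, x1, y1)])
  else cmds
termination_by words.length - i
decreasing_by all_goals omega

def decode_stream_alt (words : List Int) : List (Int × Int × Int × Int × Int × Int) :=
  decodeAltGo words 0 []

-- ===== PRECONDITION & SPEC =====
def Spec_decode_stream (words : List Int) (out : List (Int × Int × Int × Int × Int × Int)) : Prop := out = decode_stream_alt words
instance (words : List Int) (out : List (Int × Int × Int × Int × Int × Int)) : Decidable (Spec_decode_stream words out) := by unfold Spec_decode_stream; infer_instance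

-- ===== CLAIM (what is proved, stated in full; the proofs are below) =====
def Claim_equal_decode_stream : Prop := ∀ (words : List Int), Dom_decode_stream words → Spec_decode_stream words (decode_stream words)

-- ===== LEMMAS AND PROOFS =====

theorem extra_two : PySem.Dict.getD decodeExtra 2 0 = 1 := by decide
theorem extra_three : PySem.Dict.getD decodeExtra 3 0 = 2 := by decide
theorem extra_eq_mk : decodeExtra = PySem.Dict.mk [(2, 1), (3, 2)] := by decide

theorem extra_other (opc : Int) (h2 : opc ≠ 2) (h3 : opc ≠ 3) :
    PySem.Dict.getD decodeExtra opc 0 = 0 := by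
  rw [extra_eq_mk, PySem.Dict.getD_eq_get?_getD]
  simp [beq_iff_eq, Ne.symm h2, Ne.symm h3, PySem.Dict.get?]

theorem altGo_skip (words : List Int) (i : Nat) (cmds : List (Int × Int × Int × Int × Int × Int))
    (h : i < words.length)
    (h2 : PySem.Int.band (words[i] >>> 28) 15 ≠ 2) (h3 : PySem.Int.band (words[i] >>> 28) 15 ≠ 3) :
    decodeAltGo words i cmds =
      decodeAltGo words (i + 1)
        (cmds ++ [(PySem.Int.band (words[i] >>> 28) 15, PySem.Int.band (words[i] >>> 16) 4095, 0, 0, 0, 0)]) := by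
  rw [decodeAltGo, dif_pos h]
  simp only [extra_other _ h2 h3]
  rw [if_neg (by omega)]
  have ha : ((i : Int) + 1).toNat = i + 1 := by omega
  rw [add_zero, PySem.List.slice_toNat words (by positivity) (by positivity), ha,
    Nat.sub_self, List.take_zero, List.map_nil]
  rfl

theorem altGo_point_break (words : List Int) (i : Nat) (cmds : List (Int × Int × Int × Int × Int × Int))
    (h : i < words.length) (hl : ¬ i + 1 < words.length)
    (h2 : PySem.Int.band (words[i] >>> 28) 15 = 2) :
    decodeAltGo words i cmds = cmds := by
  rw [decodeAltGo, dif_pos h]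
  simp only [h2, extra_two]
  rw [if_pos (by omega)]

theorem altGo_point (words : List Int) (i : Nat) (cmds : List (Int × Int × Int × Int × Int × Int))
    (h1 : i + 1 < words.length)
    (h2 : PySem.Int.band (words[i] >>> 28) 15 = 2) :
    decodeAltGo words i cmds =
      decodeAltGo words (i + 2)
        (cmds ++ [(PySem.Int.band (words[i] >>> 28) 15, PySem.Int.band (words[i] >>> 16) 4095,
          PySem.Int.band words[i + 1] 1023, PySem.Int.band (words[i + 1] >>> 10) 511,
          PySem.Int.band words[i + 1] 1023, PySem.Int.band (words[i + 1] >>> 10) 511)]) := by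
  rw [decodeAltGo, dif_pos (by omega : i < words.length)]
  simp only [h2, extra_two]
  rw [if_neg (by omega)]
  have ha : ((i : Int) + 1).toNat = i + 1 := by omega
  have hb : ((i : Int) + 1 + 1).toNat = i + 2 := by omega
  rw [PySem.List.slice_toNat words (by positivity) (by positivity), ha, hb,
    show i + 2 - (i + 1) = 1 by omega, List.drop_eq_getElem_cons h1,
    List.take_succ_cons, List.take_zero, List.map_cons, List.map_nil]
  rfl

theorem altGo_line_break (words : List Int) (i : Nat) (cmds : List (Int × Int × Int × Int × Int × Int))
    (h : i < words.length) (hl : ¬ i + 2 < words.length)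
    (h3 : PySem.Int.band (words[i] >>> 28) 15 = 3) :
    decodeAltGo words i cmds = cmds := by
  rw [decodeAltGo, dif_pos h]
  simp only [h3, extra_three]
  rw [if_pos (by omega)]

theorem altGo_line (words : List Int) (i : Nat) (cmds : List (Int × Int × Int × Int × Int × Int))
    (hq : i + 2 < words.length)
    (h3 : PySem.Int.band (words[i] >>> 28) 15 = 3) :
    decodeAltGo words i cmds =
      decodeAltGo words (i + 3)
        (cmds ++ [(PySem.Int.band (words[i] >>> 28) 15, PySem.Int.band (words[i] >>> 16) 4095,
          PySem.Int.band words[i + 1] 1023, PySem.Int.band (words[i + 1] >>> 10) 511,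
          PySem.Int.band words[i + 2] 1023, PySem.Int.band (words[i + 2] >>> 10) 511)]) := by
  rw [decodeAltGo, dif_pos (by omega : i < words.length)]
  simp only [h3, extra_three]
  rw [if_neg (by omega)]
  have ha : ((i : Int) + 1).toNat = i + 1 := by omega
  have hb : ((i : Int) + 1 + 2).toNat = i + 3 := by omega
  rw [PySem.List.slice_toNat words (by positivity) (by positivity), ha, hb,
    show i + 3 - (i + 1) = 2 by omega, List.drop_eq_getElem_cons (by omega : i + 1 < words.length),
    List.take_succ_cons, List.drop_eq_getElem_cons hq, List.take_succ_cons,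
    List.take_zero, List.map_cons, List.map_cons, List.map_nil]
  rfl

theorem decode_loop_eq (k : Nat) : ∀ (words : List Int) (i : Nat)
    (cmds : List (Int × Int × Int × Int × Int × Int)), words.length - i ≤ k →
    decodeStreamLoop words i cmds = decodeAltGo words i cmds := by
  induction k with
  | zero =>
    intro words i cmds hk
    rw [decodeStreamLoop, dif_neg (by omega : ¬ i < words.length),
      decodeAltGo, dif_neg (by omega : ¬ i < words.length)]
  | succ k ih =>
    intro words i cmds hk
    rw [decodeStreamLoop]
    by_cases h : i < words.length
    · simp only [h, dif_pos]
      by_cases h3 : PySem.Int.band (words[i] >>> 28) 15 = 3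
      · rw [if_pos (Or.inr h3)]
        by_cases h1 : i + 1 < words.length
        · rw [dif_pos h1, if_pos h3]
          by_cases hq : i + 2 < words.length
          · rw [dif_pos hq, altGo_line _ _ _ hq h3, ih words (i + 3) _ (by omega)]
          · rw [dif_neg hq, altGo_line_break _ _ _ h hq h3]
        · rw [dif_neg h1, altGo_line_break _ _ _ h (by omega) h3]
      · by_cases h2 : PySem.Int.band (words[i] >>> 28) 15 = 2
        · rw [if_pos (Or.inl h2)]
          by_cases h1 : i + 1 < words.length
          · rw [dif_pos h1, if_neg h3, altGo_point _ _ _ h1 h2, ih words (i + 2) _ (by omega)]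
          · rw [dif_neg h1, altGo_point_break _ _ _ h h1 h2]
        · rw [if_neg (by tauto), altGo_skip _ _ _ h h2 h3, ih words (i + 1) _ (by omega)]
    · rw [dif_neg h, decodeAltGo, dif_neg h]

-- ===== VERDICT (by name: the statement is the Claim_ definition above) =====
theorem decode_stream_spec : Claim_equal_decode_stream := by
  intro words _
  unfold Spec_decode_stream decode_stream decode_stream_alt
  exact decode_loop_eq words.length words 0 [] (by omega)
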